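-- pv_equiv track=rewrite | github.com/samaksh2434/AI-summrizer | src/summarizer.py | cluster_facts
-- ===== SOURCE A (Python) =====
-- def cluster_facts(facts):
--     clusters = []
--     for fact in facts:
--         placed = False
--         fact_words = set(fact.lower().split())
--
--         for cluster in clusters:
--             base_words = set(cluster[0].lower().split())
--             if len(fact_words & base_words) >= 2:
--                 cluster.append(fact)
--                 placed = True
--                 break
--
--         if not placed:
--             clusters.append([fact])
--
--     return clusters
-- ===== SOURCE B (Python) =====
-- def cluster_facts(facts):
--     clusters = []
--     index = {}  # word -> ascending list of cluster ids whose base (first) fact contains it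
--     for fact in facts:
--         words = list(dict.fromkeys(fact.lower().split()))
--         counts = {}
--         for w in words:
--             for cid in index.get(w, []):
--                 counts[cid] = counts.get(cid, 0) + 1
--         target = min((cid for cid, c in counts.items() if c >= 2), default=None)
--         if target is None:
--             cid = len(clusters)
--             clusters.append([fact])
--             for w in words:
--                 index.setdefault(w, []).append(cid)
--         else:
--             clusters[target].append(fact)
--     return clusters
-- ===== Notes on version B (the rewrite author's own statement) =====
-- stated objective: faster
-- what changed: Replaces the per-fact rescan of every cluster's base-word set with an inverted index word->cluster ids: overlap counts are accumulated per candidate cluster and the earliest cluster with >=2 shared words is picked by min over the counts.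
import Mathlib
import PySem

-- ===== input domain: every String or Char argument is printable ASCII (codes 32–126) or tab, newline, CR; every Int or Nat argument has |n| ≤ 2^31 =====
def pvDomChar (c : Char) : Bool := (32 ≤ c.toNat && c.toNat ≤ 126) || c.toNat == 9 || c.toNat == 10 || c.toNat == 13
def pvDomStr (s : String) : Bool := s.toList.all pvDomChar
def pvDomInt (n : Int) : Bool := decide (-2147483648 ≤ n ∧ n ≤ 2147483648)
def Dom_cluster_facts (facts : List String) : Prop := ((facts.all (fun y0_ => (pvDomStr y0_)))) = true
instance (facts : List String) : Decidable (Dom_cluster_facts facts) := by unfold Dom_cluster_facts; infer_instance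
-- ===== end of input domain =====

-- B replaces A's rescan of every cluster's base-word set per fact with an inverted
-- index word → cluster ids, accumulating overlap counts and picking the earliest
-- cluster with ≥ 2 shared base words.

-- ===== PORT A =====
-- set(cluster[0].lower().split()); cluster[0] totalized as pyGetD cl 0 "" (A's clusters are never empty)
def pvBaseWords (cl : List String) : PySem.Set String :=
  PySem.Set.ofList (PySem.Str.split₀ (PySem.Str.lower (PySem.List.pyGetD cl 0 "")))

-- A's inner 'for cluster in clusters: … break': first cluster with ≥ 2 shared words gets fact appended
def clusterPlaceA (fw : PySem.Set String) (fact : String) :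
    List (List String) → Option (List (List String))
  | [] => none
  | c :: rest =>
    if 2 ≤ PySem.Set.len (PySem.Set.inter fw (pvBaseWords c)) then
      some ((c ++ [fact]) :: rest)
    else
      match clusterPlaceA fw fact rest with
      | some rest' => some (c :: rest')
      | none => none

def clusterStepA (clusters : List (List String)) (fact : String) : List (List String) :=
  let fw := PySem.Set.ofList (PySem.Str.split₀ (PySem.Str.lower fact))
  match clusterPlaceA fw fact clusters with
  | some cs => cs
  | none => clusters ++ [[fact]]

def cluster_facts (facts : List String) : List (List String) :=
  facts.foldl clusterStepA []

-- ===== PORT B =====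
-- state: (clusters, inverted index word → ascending list of cluster ids whose base fact contains it)
def clusterStepB (st : List (List String) × PySem.Dict String (List Nat)) (fact : String) :
    List (List String) × PySem.Dict String (List Nat) :=
  let ws := PySem.List.dedup (PySem.Str.split₀ (PySem.Str.lower fact))
  let counts : PySem.Dict Nat Int :=
    ws.foldl (fun d w => (st.2.getD w []).foldl (fun d cid => d.modify cid 0 (· + 1)) d)
      PySem.Dict.empty
  match PySem.List.min? ((counts.items.filter (fun p => decide (2 ≤ p.2))).map (fun p => p.1))
      (fun x => x) with
  | none =>
      (st.1 ++ [[fact]],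
       ws.foldl (fun d w => d.modify w [] (· ++ [st.1.length])) st.2)
  | some t => (st.1.set t ((st.1.getD t []) ++ [fact]), st.2)

def cluster_facts_alt (facts : List String) : List (List String) :=
  (facts.foldl clusterStepB ([], PySem.Dict.empty)).1

-- ===== PRECONDITION & SPEC =====
def Spec_cluster_facts (facts : List String) (out : List (List String)) : Prop := out = cluster_facts_alt facts
instance (facts : List String) (out : List (List String)) : Decidable (Spec_cluster_facts facts out) := by unfold Spec_cluster_facts; infer_instance

-- ===== CLAIM (what is proved, stated in full; the proofs are below) =====
def Claim_equal_cluster_facts : Prop := ∀ (facts : List String), Dom_cluster_facts facts → Spec_cluster_facts facts (cluster_facts facts)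

-- ===== LEMMAS AND PROOFS =====

-- the invariant tying B's inverted index to the clusters list
def pvInv (clusters : List (List String)) (idx : PySem.Dict String (List Nat)) : Prop :=
  (∀ cl ∈ clusters, cl ≠ []) ∧
  ∀ w, idx.getD w [] =
    (List.range clusters.length).filter (fun i => decide (w ∈ pvBaseWords (clusters.getD i [])))

theorem pvCounts_getD (g : String → List Nat) (hg : ∀ w, (g w).Nodup) :
    ∀ (ws : List String) (d : PySem.Dict Nat Int) (i : Nat),
      (ws.foldl (fun d w => (g w).foldl (fun d cid => d.modify cid 0 (· + 1)) d) d).getD i 0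
        = d.getD i 0 + (ws.countP (fun w => decide (i ∈ g w)) : Int) := by
  intro ws
  induction ws with
  | nil => intro d i; simp
  | cons w ws ih =>
    intro d i
    simp only [List.foldl_cons, List.countP_cons]
    rw [ih, PySem.Dict.getD_foldl_modify_add_one]
    by_cases h : i ∈ g w
    · rw [List.count_eq_one_of_mem (hg w) h]
      simp [h]; ring
    · rw [List.count_eq_zero_of_not_mem h]
      simp [h]

theorem pvCounts_nodup_keys (g : String → List Nat) :
    ∀ (ws : List String) (d : PySem.Dict Nat Int), d.keys.Nodup →
      (ws.foldl (fun d w => (g w).foldl (fun d cid => d.modify cid 0 (· + 1)) d) d).keys.Nodup := by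
  intro ws
  induction ws with
  | nil => intro d h; exact h
  | cons w ws ih =>
    intro d h
    simp only [List.foldl_cons]
    exact ih _ (PySem.Dict.nodup_keys_foldl_modify_key (g w) (fun x => x) 0 (fun _ _ => (· + 1)) d h)

theorem pvCand_mem (g : String → List Nat) (hg : ∀ w, (g w).Nodup) (ws : List String) (i : Nat) :
    (i ∈ (((ws.foldl (fun d w => (g w).foldl (fun d cid => d.modify cid 0 (· + 1)) d)
        (PySem.Dict.empty : PySem.Dict Nat Int)).items.filter
          (fun p => decide (2 ≤ p.2))).map (fun p => p.1)))
      ↔ 2 ≤ ws.countP (fun w => decide (i ∈ g w)) := by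
  set counts := ws.foldl (fun d w => (g w).foldl (fun d cid => d.modify cid 0 (· + 1)) d)
      (PySem.Dict.empty : PySem.Dict Nat Int) with hc
  have hnd : counts.keys.Nodup := pvCounts_nodup_keys g ws _ (by simp [PySem.Dict.keys_empty])
  have hgetD : counts.getD i 0 = (ws.countP (fun w => decide (i ∈ g w)) : Int) := by
    rw [hc, pvCounts_getD g hg]; simp [PySem.Dict.getD_empty]
  constructor
  · intro h
    obtain ⟨p, hp, hp1⟩ := List.mem_map.mp h
    obtain ⟨hpm, hp2⟩ := List.mem_filter.mp hp
    have hpe : (p.1, p.2) ∈ counts.items := by simpa using hpm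
    have := PySem.Dict.getD_of_mem_items counts hpe hnd 0
    rw [hp1, hgetD] at this
    have h2 : (2:Int) ≤ p.2 := by simpa using hp2
    omega
  · intro h
    have h2 : (2:Int) ≤ counts.getD i 0 := by rw [hgetD]; exact_mod_cast h
    have hcon : counts.contains i = true := by
      by_contra hf
      rw [PySem.Dict.getD_of_not_contains counts 0 (by simpa using hf)] at h2
      omega
    obtain ⟨v, hv⟩ : ∃ v, counts.get? i = some v := by
      cases hq : counts.get? i with
      | none => rw [PySem.Dict.getD_eq_get?_getD, hq] at h2; simp at h2
      | some v => exact ⟨v, rfl⟩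
    have hvd : counts.getD i 0 = v := PySem.Dict.getD_of_get?_eq_some counts 0 hv
    refine List.mem_map.mpr ⟨(i, v), List.mem_filter.mpr
      ⟨PySem.Dict.mem_items_of_get?_eq_some counts hv, ?_⟩, rfl⟩
    simp only [decide_eq_true_eq]
    rw [← hvd]; exact h2

theorem pvPlaceA_none (fw : PySem.Set String) (fact : String) (clusters : List (List String))
    (h : ∀ cl ∈ clusters, ¬ (2 ≤ PySem.Set.len (PySem.Set.inter fw (pvBaseWords cl)))) :
    clusterPlaceA fw fact clusters = none := by
  induction clusters with
  | nil => rfl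
  | cons c rest ih =>
    rw [clusterPlaceA, if_neg (h c (by simp)), ih (fun cl hcl => h cl (by simp [hcl]))]

theorem pvPlaceA_at (fw : PySem.Set String) (fact : String) :
    ∀ (clusters : List (List String)) (t : Nat), t < clusters.length →
      2 ≤ PySem.Set.len (PySem.Set.inter fw (pvBaseWords (clusters.getD t []))) →
      (∀ i < t, ¬ (2 ≤ PySem.Set.len (PySem.Set.inter fw (pvBaseWords (clusters.getD i []))))) →
      clusterPlaceA fw fact clusters = some (clusters.set t (clusters.getD t [] ++ [fact])) := by
  intro clusters
  induction clusters with
  | nil => intro t ht; simp at ht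
  | cons c rest ih =>
    intro t ht hhit hmin
    cases t with
    | zero =>
      simp only [List.getD_cons_zero] at hhit
      rw [clusterPlaceA, if_pos hhit]
      simp
    | succ s =>
      have h0 := hmin 0 (Nat.succ_pos s)
      simp only [List.getD_cons_zero] at h0
      rw [clusterPlaceA, if_neg h0]
      have := ih s (by simpa using ht) (by simpa using hhit)
        (fun i hi => by simpa using hmin (i+1) (by omega))
      rw [this]
      simp

-- A's overlap condition expressed as a countP over B's deduplicated word list
theorem pvCond_iff (fact : String) (cl : List String) :
    (2 ≤ PySem.Set.len (PySem.Set.inter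
        (PySem.Set.ofList (PySem.Str.split₀ (PySem.Str.lower fact))) (pvBaseWords cl)))
      ↔ 2 ≤ (PySem.List.dedup (PySem.Str.split₀ (PySem.Str.lower fact))).countP
          (fun w => decide (w ∈ pvBaseWords cl)) := by
  have hc : List.countP (fun x => (pvBaseWords cl).contains x)
        (PySem.Set.ofList (PySem.Str.split₀ (PySem.Str.lower fact)))
      = List.countP (fun w => decide (w ∈ pvBaseWords cl))
        (PySem.Set.ofList (PySem.Str.split₀ (PySem.Str.lower fact))) :=
    List.countP_congr (fun x _ => by simp)
  rw [show PySem.Set.inter (PySem.Set.ofList (PySem.Str.split₀ (PySem.Str.lower fact))) (pvBaseWords cl)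
      = (PySem.Set.ofList (PySem.Str.split₀ (PySem.Str.lower fact))).filter
          (fun x => (pvBaseWords cl).contains x) from rfl]
  rw [show PySem.Set.len = fun (s : PySem.Set String) => (s.length : Int) from rfl]
  simp only
  rw [← List.countP_eq_length_filter, hc, PySem.List.dedup_eq_ofList]
  constructor
  · intro h; exact_mod_cast h
  · intro h; exact_mod_cast h

theorem pvBaseWords_append (cl : List String) (x : String) (h : cl ≠ []) :
    pvBaseWords (cl ++ [x]) = pvBaseWords cl := by
  cases cl with
  | nil => exact absurd rfl h
  | cons a l =>
    unfold pvBaseWords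
    rw [show ((0:ℤ)) = ((0:ℕ):ℤ) from rfl, PySem.List.pyGetD_natCast, PySem.List.pyGetD_natCast]
    rfl

theorem pvBaseWords_singleton (fact : String) :
    pvBaseWords [fact] = PySem.Set.ofList (PySem.Str.split₀ (PySem.Str.lower fact)) := by
  unfold pvBaseWords
  rw [show ((0:ℤ)) = ((0:ℕ):ℤ) from rfl, PySem.List.pyGetD_natCast]
  rfl

theorem pvMapFilter (ws : List String) (L : Nat) (c : String) :
    (((ws.map (fun w => (w, L))).filter (fun p => p.1 == c)).map (fun p => p.2))
      = List.replicate (ws.count c) L := by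
  induction ws with
  | nil => rfl
  | cons w ws ih =>
    simp only [List.map_cons, List.filter_cons, List.count_cons]
    by_cases h : w = c
    · subst h
      simp [ih, List.replicate_succ]
    · simp [h, ih]

theorem pvIdx_append (ws : List String) (hnd : ws.Nodup) (idx : PySem.Dict String (List Nat))
    (L : Nat) (w : String) :
    ((ws.foldl (fun d w => d.modify w [] (· ++ [L])) idx).getD w [])
      = idx.getD w [] ++ (if w ∈ ws then [L] else []) := by
  have hmap : ws.foldl (fun d w => d.modify w [] (· ++ [L])) idx
      = (ws.map (fun w => (w, L))).foldl (fun d p => d.modify p.1 [] (· ++ [p.2])) idx := by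
    rw [List.foldl_map]
  rw [hmap, PySem.Dict.getD_foldl_modify_append, pvMapFilter]
  by_cases h : w ∈ ws
  · rw [List.count_eq_one_of_mem hnd h, if_pos h]
    rfl
  · rw [List.count_eq_zero_of_not_mem h, if_neg h]
    rfl

theorem pvStepA_eq (clusters : List (List String)) (fact : String) :
    clusterStepA clusters fact =
      match clusterPlaceA (PySem.Set.ofList (PySem.Str.split₀ (PySem.Str.lower fact)))
          fact clusters with
      | some cs => cs
      | none => clusters ++ [[fact]] := rfl

set_option maxHeartbeats 2000000 in
theorem pvStep_eq (clusters : List (List String)) (idx : PySem.Dict String (List Nat))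
    (fact : String) (hInv : pvInv clusters idx) :
    (clusterStepB (clusters, idx) fact).1 = clusterStepA clusters fact ∧
    pvInv (clusterStepB (clusters, idx) fact).1 (clusterStepB (clusters, idx) fact).2 := by
  obtain ⟨hne, hidx⟩ := hInv
  unfold clusterStepB
  simp only
  set L := clusters.length with hL
  set ws := PySem.List.dedup (PySem.Str.split₀ (PySem.Str.lower fact)) with hws
  have hg : ∀ w, (idx.getD w []).Nodup := fun w => by
    rw [hidx w]; exact (List.nodup_range).filter _
  have hmemg : ∀ w i, i ∈ idx.getD w [] ↔ i < L ∧ w ∈ pvBaseWords (clusters.getD i []) := by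
    intro w i
    rw [hidx w]
    simp [List.mem_filter, List.mem_range]
  have hcount : ∀ i, i < L → ((ws.countP (fun w => decide (i ∈ idx.getD w [])))
      = ws.countP (fun w => decide (w ∈ pvBaseWords (clusters.getD i [])))) := by
    intro i hi
    exact List.countP_congr (fun w _ => by
      simp only [decide_eq_true_eq]
      rw [hmemg w i]
      exact ⟨fun h => h.2, fun h => ⟨hi, h⟩⟩)
  have hsmall : ∀ i, 2 ≤ ws.countP (fun w => decide (i ∈ idx.getD w [])) → i < L := by
    intro i h
    have hp : 0 < ws.countP (fun w => decide (i ∈ idx.getD w [])) := by omega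
    obtain ⟨w, _, hw⟩ := List.countP_pos_iff.mp hp
    exact ((hmemg w i).mp (of_decide_eq_true hw)).1
  set counts : PySem.Dict Nat Int :=
    ws.foldl (fun d w => (idx.getD w []).foldl (fun d cid => d.modify cid 0 (· + 1)) d)
      PySem.Dict.empty with hcounts
  set cand := ((counts.items.filter (fun p => decide (2 ≤ p.2))).map (fun p => p.1)) with hcand
  have hcm : ∀ i, i ∈ cand ↔ 2 ≤ ws.countP (fun w => decide (i ∈ idx.getD w [])) := fun i =>
    pvCand_mem (fun w => idx.getD w []) hg ws i
  cases hm : PySem.List.min? cand (fun x => x) with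
  | none =>
    have hnohit : ∀ cl ∈ clusters, ¬ (2 ≤ PySem.Set.len (PySem.Set.inter
        (PySem.Set.ofList (PySem.Str.split₀ (PySem.Str.lower fact))) (pvBaseWords cl))) := by
      intro cl hcl hcond
      obtain ⟨i, hi, hget⟩ := List.mem_iff_getElem.mp hcl
      have hgd : clusters.getD i [] = cl := by
        rw [List.getD_eq_getElem clusters [] hi, hget]
      have h2 := (pvCond_iff fact cl).mp hcond
      rw [← hgd] at h2
      have hic := (hcm i).mpr (by rw [hcount i hi]; exact h2)
      rw [PySem.List.min?_eq_none_iff] at hm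
      rw [hm] at hic
      exact absurd hic (List.not_mem_nil)
    have hA : clusterStepA clusters fact = clusters ++ [[fact]] := by
      rw [pvStepA_eq, pvPlaceA_none _ _ _ hnohit]
    rw [hA]
    refine ⟨rfl, ?_, ?_⟩
    · intro cl hcl
      rcases List.mem_append.mp hcl with h | h
      · exact hne cl h
      · simp at h; rw [h]; simp
    · intro w
      rw [pvIdx_append ws (by rw [hws]; exact PySem.List.nodup_dedup _) idx L w, hidx w]
      simp only [List.length_append, List.length_singleton, List.range_succ,
        List.filter_append]
      have e1 : List.filter (fun i => decide (w ∈ pvBaseWords ((clusters ++ [[fact]]).getD i [])))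
          (List.range L) = List.filter (fun i => decide (w ∈ pvBaseWords (clusters.getD i [])))
          (List.range L) :=
        List.filter_congr (fun i hi => by
          rw [List.getD_append _ _ _ _ (List.mem_range.mp hi)])
      have e2 : List.filter (fun i => decide (w ∈ pvBaseWords ((clusters ++ [[fact]]).getD i [])))
          [L] = (if w ∈ ws then [L] else []) := by
        simp only [List.filter_cons, List.filter_nil]
        have hgd : (clusters ++ [[fact]]).getD L [] = [fact] := by
          rw [List.getD_eq_getElem _ [] (by simp [hL]),
            List.getElem_append_right (by omega)]
          simp [hL]
        rw [hgd, pvBaseWords_singleton]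
        by_cases h : w ∈ ws
        · rw [if_pos h, if_pos]
          simp only [decide_eq_true_eq]
          rw [PySem.Set.mem_ofList]
          rw [hws] at h
          exact (PySem.List.mem_dedup _ _).mp h
        · rw [if_neg h, if_neg]
          simp only [decide_eq_true_eq]
          rw [PySem.Set.mem_ofList]
          intro hmem
          exact h (by rw [hws]; exact (PySem.List.mem_dedup _ _).mpr hmem)
      rw [e1, e2]
  | some t =>
    have htc := (hcm t).mp (PySem.List.min?_mem hm)
    have htL : t < L := hsmall t htc
    have hgetmem : clusters.getD t [] ∈ clusters := by
      rw [List.getD_eq_getElem clusters [] htL]; exact List.getElem_mem _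
    have hhit : 2 ≤ PySem.Set.len (PySem.Set.inter
        (PySem.Set.ofList (PySem.Str.split₀ (PySem.Str.lower fact)))
        (pvBaseWords (clusters.getD t []))) := by
      rw [pvCond_iff, ← hws, ← hcount t htL]; exact htc
    have hmin : ∀ i < t, ¬ (2 ≤ PySem.Set.len (PySem.Set.inter
        (PySem.Set.ofList (PySem.Str.split₀ (PySem.Str.lower fact)))
        (pvBaseWords (clusters.getD i [])))) := by
      intro i hi hcond
      have h2 := (pvCond_iff fact _).mp hcond
      rw [← hws] at h2
      have hiL : i < L := lt_trans hi htL
      have hic : i ∈ cand := (hcm i).mpr (by rw [hcount i hiL]; exact h2)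
      have := PySem.List.min?_isMin hm i hic
      omega
    have hA : clusterStepA clusters fact = clusters.set t ((clusters.getD t []) ++ [fact]) := by
      rw [pvStepA_eq, pvPlaceA_at _ _ _ t htL hhit hmin]
    rw [hA]
    refine ⟨rfl, ?_, ?_⟩
    · intro cl hcl
      rcases List.mem_or_eq_of_mem_set hcl with h | h
      · exact hne cl h
      · rw [h]; simp
    · intro w
      rw [hidx w, List.length_set]
      refine List.filter_congr (fun i hi => ?_)
      have hiL : i < L := List.mem_range.mp hi
      simp only [decide_eq_decide]
      by_cases hit : i = t
      · subst hit
        have hg2 : (clusters.set i (clusters.getD i [] ++ [fact])).getD i []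
            = clusters.getD i [] ++ [fact] := by
          rw [List.getD_eq_getElem _ [] (by rw [List.length_set]; exact hiL),
            List.getElem_set_self]
        rw [hg2, pvBaseWords_append _ _ (hne _ hgetmem)]
      · have hg2 : (clusters.set t (clusters.getD t [] ++ [fact])).getD i []
            = clusters.getD i [] := by
          rw [List.getD_eq_getElem _ [] (by rw [List.length_set]; exact hiL),
            List.getElem_set_ne (by omega), ← List.getD_eq_getElem clusters [] hiL]
        rw [hg2]

theorem pvFold_eq : ∀ (facts : List String) (clusters : List (List String))
    (idx : PySem.Dict String (List Nat)), pvInv clusters idx →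
    (facts.foldl clusterStepB (clusters, idx)).1 = facts.foldl clusterStepA clusters := by
  intro facts
  induction facts with
  | nil => intro _ _ _; rfl
  | cons f rest ih =>
    intro clusters idx hInv
    obtain ⟨h1, h2⟩ := pvStep_eq clusters idx f hInv
    have := ih (clusterStepB (clusters, idx) f).1 (clusterStepB (clusters, idx) f).2 h2
    simp only [List.foldl_cons, Prod.mk.eta] at this ⊢
    rw [this, h1]

-- ===== VERDICT (by name: the statement is the Claim_ definition above) =====
theorem cluster_facts_spec : Claim_equal_cluster_facts := by
  intro facts _
  unfold Spec_cluster_facts cluster_facts cluster_facts_alt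
  refine (pvFold_eq facts [] PySem.Dict.empty ?_).symm
  constructor
  · intro cl h; cases h
  · intro w; simp [PySem.Dict.getD_empty]
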